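-- pv_equiv track=rewrite | github.com/DolphinLong/dersdagitimprogrami | algorithms/ml_scheduler.py | _check_gap
-- ===== SOURCE A (Python) =====
-- from typing import Dict, List
--
-- def _check_gap(schedule: List[Dict], class_id: int, day: int, slot: int) -> int:
--     """Check if placing at this slot would create a gap"""
--     class_slots_today = [e["time_slot"] for e in schedule if e["class_id"] == class_id and e["day"] == day]
--
--     if not class_slots_today:
--         return 0
--
--     min_slot = min(class_slots_today)
--     max_slot = max(class_slots_today)
--
--     # Check if this slot would create a gap
--     if slot < min_slot or slot > max_slot:
--         return 0
--
--     # Check if there's a gap between this slot and existing slots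
--     all_slots = class_slots_today + [slot]
--     all_slots.sort()
--
--     for i in range(len(all_slots) - 1):
--         if all_slots[i + 1] - all_slots[i] > 1:
--             return 1
--
--     return 0
-- ===== SOURCE B (Python) =====
-- def _check_gap(schedule, class_id, day, slot):
--     same = {e["time_slot"] for e in schedule if e["class_id"] == class_id and e["day"] == day}
--     if not same:
--         return 0
--     mn = min(same)
--     mx = max(same)
--     if slot < mn or slot > mx:
--         return 0
--     same.add(slot)
--     return 1 if mx - mn + 1 != len(same) else 0
-- ===== Notes on version B (the rewrite author's own statement) =====
-- stated objective: simpler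
-- what changed: Replaces the sort plus adjacent-pair gap scan with a closed-form contiguity test: collect the day's slots as a set, and after the two early returns compare the interval width mx-mn+1 with the distinct-slot count including the new slot.
import Mathlib
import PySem

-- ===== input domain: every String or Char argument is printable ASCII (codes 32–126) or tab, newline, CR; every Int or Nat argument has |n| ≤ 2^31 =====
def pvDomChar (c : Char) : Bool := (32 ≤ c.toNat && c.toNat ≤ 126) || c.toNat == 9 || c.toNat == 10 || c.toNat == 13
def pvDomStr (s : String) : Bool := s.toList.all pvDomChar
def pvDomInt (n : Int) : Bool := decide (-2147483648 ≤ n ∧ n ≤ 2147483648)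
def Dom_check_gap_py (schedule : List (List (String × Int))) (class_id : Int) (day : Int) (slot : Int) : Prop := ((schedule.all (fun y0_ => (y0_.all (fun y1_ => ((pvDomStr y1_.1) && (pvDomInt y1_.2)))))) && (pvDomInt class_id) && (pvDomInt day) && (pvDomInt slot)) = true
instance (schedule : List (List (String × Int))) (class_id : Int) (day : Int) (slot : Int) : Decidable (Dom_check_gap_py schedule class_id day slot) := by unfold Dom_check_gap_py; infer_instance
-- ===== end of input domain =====

-- B replaces A's sort plus adjacent-pair gap scan by a closed-form contiguity test (interval width vs distinct-slot count) on a set of the day's slots; objective: simpler.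


-- ===== PORT A =====
-- the comprehension [e["time_slot"] for e in schedule if e["class_id"] == class_id and e["day"] == day];
-- none = some dict lookup raises KeyError (those inputs are excluded by Pre_)
def slotsA (schedule : List (List (String × Int))) (class_id : Int) (day : Int) : Option (List Int) :=
  match schedule with
  | [] => some []
  | e :: rest =>
    match PySem.Dict.get? (PySem.Dict.mk e) "class_id" with
    | none => none
    | some cv =>
      if cv = class_id then
        match PySem.Dict.get? (PySem.Dict.mk e) "day" with
        | none => none
        | some dv =>
          if dv = day then
            match PySem.Dict.get? (PySem.Dict.mk e) "time_slot" with
            | none => none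
            | some ts => (slotsA rest class_id day).map (fun l => ts :: l)
          else slotsA rest class_id day
      else slotsA rest class_id day

-- the for-loop over adjacent positions i, i+1 of all_slots: 1 at the first gap > 1, else 0
def gapScanA : List Int → Int
  | a :: b :: t => if b - a > 1 then 1 else gapScanA (b :: t)
  | _ => 0

def check_gap_py (schedule : List (List (String × Int))) (class_id : Int) (day : Int) (slot : Int) : Int :=
  match slotsA schedule class_id day with
  | none => 0   -- unreachable under Pre_ (the Python raises KeyError)
  | some class_slots_today =>
    if class_slots_today = [] then 0
    else
      match PySem.List.min? class_slots_today (fun x => x), PySem.List.max? class_slots_today (fun x => x) with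
      | some min_slot, some max_slot =>
        if slot < min_slot ∨ slot > max_slot then 0
        else gapScanA (PySem.List.sorted (class_slots_today ++ [slot]) (fun x => x) false)
      | _, _ => 0

-- ===== PORT B =====
-- the set comprehension {e["time_slot"] for e in schedule if e["class_id"] == class_id and e["day"] == day},
-- built left to right into acc; none = some dict lookup raises KeyError (excluded by Pre_)
def slotsB (acc : PySem.Set Int) (schedule : List (List (String × Int))) (class_id : Int) (day : Int) : Option (PySem.Set Int) :=
  match schedule with
  | [] => some acc
  | e :: rest =>
    match PySem.Dict.get? (PySem.Dict.mk e) "class_id" with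
    | some cv =>
      if cv = class_id then
        match PySem.Dict.get? (PySem.Dict.mk e) "day" with
        | some dv =>
          if dv = day then
            match PySem.Dict.get? (PySem.Dict.mk e) "time_slot" with
            | some ts => slotsB (PySem.Set.add acc ts) rest class_id day
            | none => none
          else slotsB acc rest class_id day
        | none => none
      else slotsB acc rest class_id day
    | none => none

def check_gap_py_alt (schedule : List (List (String × Int))) (class_id : Int) (day : Int) (slot : Int) : Int :=
  match slotsB PySem.Set.empty schedule class_id day with
  | some same =>
    if same = [] then 0
    else
      match PySem.List.min? same (fun x => x) with
      | some mn =>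
        match PySem.List.max? same (fun x => x) with
        | some mx =>
          if slot < mn ∨ slot > mx then 0
          else if (mx - mn + 1 : Int) ≠ ((PySem.Set.add same slot).length : Int) then 1 else 0
        | none => 0   -- unreachable: the set is nonempty
      | none => 0   -- unreachable: the set is nonempty
  | none => 0   -- unreachable under Pre_ (the Python raises KeyError)

-- ===== PRECONDITION & SPEC =====
-- Pre_ excludes exactly the inputs where A raises KeyError: an entry missing a key that the
-- short-circuiting filter e["class_id"] == class_id and e["day"] == day actually looks up.
def Pre_check_gap_py (schedule : List (List (String × Int))) (class_id : Int) (day : Int) (slot : Int) : Prop :=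
  ∀ e ∈ schedule,
    (PySem.Dict.get? (PySem.Dict.mk e) "class_id").isSome = true ∧
    (PySem.Dict.get? (PySem.Dict.mk e) "class_id" = some class_id →
      (PySem.Dict.get? (PySem.Dict.mk e) "day").isSome = true ∧
      (PySem.Dict.get? (PySem.Dict.mk e) "day" = some day → (PySem.Dict.get? (PySem.Dict.mk e) "time_slot").isSome = true))
instance (schedule : List (List (String × Int))) (class_id : Int) (day : Int) (slot : Int) : Decidable (Pre_check_gap_py schedule class_id day slot) := by unfold Pre_check_gap_py; infer_instance

def pvWitness_check_gap_py : (List (List (String × Int))) × Int × Int × Int :=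
  ([[("class_id", 1), ("day", 0), ("time_slot", 2)], [("class_id", 1), ("day", 0), ("time_slot", 4)]], 1, 0, 3)

def Spec_check_gap_py (schedule : List (List (String × Int))) (class_id : Int) (day : Int) (slot : Int) (out : Int) : Prop := out = check_gap_py_alt schedule class_id day slot
instance (schedule : List (List (String × Int))) (class_id : Int) (day : Int) (slot : Int) (out : Int) : Decidable (Spec_check_gap_py schedule class_id day slot out) := by unfold Spec_check_gap_py; infer_instance

-- ===== CLAIM (what is proved, stated in full; the proofs are below) =====
def Claim_equal_check_gap_py : Prop := ∀ (schedule : List (List (String × Int))) (class_id : Int) (day : Int) (slot : Int), Dom_check_gap_py schedule class_id day slot → Pre_check_gap_py schedule class_id day slot → Spec_check_gap_py schedule class_id day slot (check_gap_py schedule class_id day slot)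

-- ===== LEMMAS AND PROOFS =====

theorem le_getLast_of_pairwise (t : List Int) (a : Int) (h : List.Pairwise (· ≤ ·) (a :: t)) :
    ∀ x ∈ a :: t, x ≤ (a :: t).getLast (List.cons_ne_nil a t) := by
  induction t generalizing a with
  | nil => simp
  | cons b t ih =>
    intro x hx
    rw [List.getLast_cons (List.cons_ne_nil b t)]
    rcases List.mem_cons.mp hx with rfl | hx
    · exact le_trans (List.rel_of_pairwise_cons h (List.mem_cons_self)) (ih b h.tail b List.mem_cons_self)
    · exact ih b h.tail x hx

theorem gapA_iff (t : List Int) (a : Int) (h : List.Pairwise (· ≤ ·) (a :: t)) :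
    (gapScanA (a :: t) = 0 ↔ ∀ k : Int, a ≤ k → k ≤ (a :: t).getLast (List.cons_ne_nil a t) → k ∈ a :: t) := by
  induction t generalizing a with
  | nil =>
    simp only [gapScanA, List.getLast_singleton]
    constructor
    · intro _ k h1 h2; simp [le_antisymm h2 h1]
    · intro _; trivial
  | cons b t ih =>
    have hlast : (a :: b :: t).getLast (List.cons_ne_nil _ _) = (b :: t).getLast (List.cons_ne_nil b t) :=
      List.getLast_cons (List.cons_ne_nil b t)
    have hab : a ≤ b := List.rel_of_pairwise_cons h List.mem_cons_self
    have hblast : b ≤ (b :: t).getLast (List.cons_ne_nil b t) :=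
      le_getLast_of_pairwise t b h.tail b List.mem_cons_self
    have hge : ∀ x ∈ b :: t, b ≤ x := by
      intro x hx
      rcases List.mem_cons.mp hx with rfl | hx
      · exact le_refl _
      · exact List.rel_of_pairwise_cons h.tail hx
    rw [hlast]
    by_cases hgap : b - a > 1
    · have h1 : gapScanA (a :: b :: t) = 1 := by simp [gapScanA, hgap]
      rw [h1]
      constructor
      · intro hc; exact absurd hc (by norm_num)
      · intro hall
        have hmem := hall (a + 1) (by omega) (by omega)
        rcases List.mem_cons.mp hmem with heq | hmem
        · omega
        · have := hge _ hmem; omega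
    · have hstep : gapScanA (a :: b :: t) = gapScanA (b :: t) := by simp [gapScanA, hgap]
      rw [hstep, ih b h.tail]
      constructor
      · intro hall k hk1 hk2
        by_cases hkb : b ≤ k
        · exact List.mem_cons_of_mem a (hall k hkb hk2)
        · have : k = a := by omega
          simp [this]
      · intro hall k hk1 hk2
        have hm := hall k (le_trans hab hk1) hk2
        rcases List.mem_cons.mp hm with heq | hmem
        · have : k = b := by omega
          simp [this]
        · exact hmem

theorem strict_span (t : List Int) (a : Int) (h : List.Pairwise (· < ·) (a :: t)) :
    (t.length : Int) ≤ (a :: t).getLast (List.cons_ne_nil a t) - a := by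
  induction t generalizing a with
  | nil => simp
  | cons b t ih =>
    rw [List.getLast_cons (List.cons_ne_nil b t)]
    have hih := ih b h.tail
    have hab : a < b := List.rel_of_pairwise_cons h List.mem_cons_self
    simp only [List.length_cons]
    push_cast
    omega

theorem strictLen_iff (t : List Int) (a : Int) (h : List.Pairwise (· < ·) (a :: t)) :
    (((a :: t).length : Int) = (a :: t).getLast (List.cons_ne_nil a t) - a + 1 ↔
      ∀ k : Int, a ≤ k → k ≤ (a :: t).getLast (List.cons_ne_nil a t) → k ∈ a :: t) := by
  induction t generalizing a with
  | nil =>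
    simp only [List.getLast_singleton, List.length_cons, List.length_nil]
    constructor
    · intro _ k h1 h2; simp [le_antisymm h2 h1]
    · intro _; push_cast; ring
  | cons b t ih =>
    have hlast : (a :: b :: t).getLast (List.cons_ne_nil _ _) = (b :: t).getLast (List.cons_ne_nil b t) :=
      List.getLast_cons (List.cons_ne_nil b t)
    have hab : a < b := List.rel_of_pairwise_cons h List.mem_cons_self
    have hblast : b ≤ (b :: t).getLast (List.cons_ne_nil b t) :=
      le_getLast_of_pairwise t b (h.tail.imp le_of_lt) b List.mem_cons_self
    have hspan := strict_span t b h.tail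
    have hge : ∀ x ∈ t, b < x := fun x hx => List.rel_of_pairwise_cons h.tail hx
    rw [hlast]
    constructor
    · intro hlen k hk1 hk2
      have hb : b = a + 1 := by
        simp only [List.length_cons] at hlen
        push_cast at hlen
        omega
      have hlen' : ((b :: t).length : Int) = (b :: t).getLast (List.cons_ne_nil b t) - b + 1 := by
        simp only [List.length_cons] at hlen ⊢
        push_cast at hlen ⊢
        omega
      by_cases hkb : b ≤ k
      · exact List.mem_cons_of_mem a ((ih b h.tail).mp hlen' k hkb hk2)
      · have : k = a := by omega
        simp [this]
    · intro hall
      have hb : b = a + 1 := by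
        have hmem := hall (a + 1) (by omega) (by omega)
        rcases List.mem_cons.mp hmem with heq | hmem
        · omega
        · rcases List.mem_cons.mp hmem with heq | hmem
          · omega
          · have := hge _ hmem; omega
      have htail : ∀ k : Int, b ≤ k → k ≤ (b :: t).getLast (List.cons_ne_nil b t) → k ∈ b :: t := by
        intro k hk1 hk2
        have hm := hall k (by omega) hk2
        rcases List.mem_cons.mp hm with heq | hmem
        · omega
        · exact hmem
      have := (ih b h.tail).mpr htail
      simp only [List.length_cons] at this ⊢
      push_cast at this ⊢
      omega

theorem gapScanA_01 (s : List Int) : gapScanA s = 0 ∨ gapScanA s = 1 := by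
  induction s with
  | nil => simp [gapScanA]
  | cons a s ih =>
    cases s with
    | nil => simp [gapScanA]
    | cons b t =>
      by_cases hgap : b - a > 1
      · right; simp [gapScanA, hgap]
      · have : gapScanA (a :: b :: t) = gapScanA (b :: t) := by simp [gapScanA, hgap]
        rw [this]
        exact ih

theorem min?_id_eq (l : List Int) (m : Int) (hm : m ∈ l) (hb : ∀ x ∈ l, m ≤ x) :
    PySem.List.min? l (fun x => x) = some m := by
  cases hc : PySem.List.min? l (fun x => x) with
  | none => rw [PySem.List.min?_eq_none_iff] at hc; subst hc; simp at hm
  | some m' =>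
    have h1 : m' ∈ l := PySem.List.min?_mem hc
    have h2 : ∀ x ∈ l, m' ≤ x := fun x hx => PySem.List.min?_id_le hc x hx
    have : m = m' := le_antisymm (hb m' h1) (h2 m hm)
    rw [this]

theorem max?_id_eq (l : List Int) (m : Int) (hm : m ∈ l) (hb : ∀ x ∈ l, x ≤ m) :
    PySem.List.max? l (fun x => x) = some m := by
  cases hc : PySem.List.max? l (fun x => x) with
  | none => rw [PySem.List.max?_eq_none_iff] at hc; subst hc; simp at hm
  | some m' =>
    have h1 : m' ∈ l := PySem.List.max?_mem hc
    have h2 : ∀ x ∈ l, x ≤ m' := fun x hx => PySem.List.max?_isMax hc x hx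
    have : m = m' := le_antisymm (h2 m hm) (hb m' h1)
    rw [this]

-- the heart: sorted-adjacent gap scan = closed-form range-vs-cardinality test

theorem core (l : List Int) (mn mx slot : Int)
    (hmn1 : mn ∈ l) (hmn2 : ∀ x ∈ l, mn ≤ x)
    (hmx1 : mx ∈ l) (hmx2 : ∀ x ∈ l, x ≤ mx)
    (h1 : mn ≤ slot) (h2 : slot ≤ mx) :
    gapScanA (PySem.List.sorted (l ++ [slot]) (fun x => x) false)
      = if (mx - mn + 1 : Int) ≠ ((PySem.Set.add (PySem.Set.ofList l) slot).length : Int) then 1 else 0 := by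
  set L := l ++ [slot] with hL
  have hadd : PySem.Set.add (PySem.Set.ofList l) slot = PySem.Set.ofList L := by
    simp [hL, PySem.Set.ofList_eq_foldl]
  have hmnL1 : mn ∈ L := by simp [hL, hmn1]
  have hmnL2 : ∀ x ∈ L, mn ≤ x := by
    intro x hx; rcases List.mem_append.mp hx with hx | hx
    · exact hmn2 x hx
    · simp at hx; omega
  have hmxL1 : mx ∈ L := by simp [hL, hmx1]
  have hmxL2 : ∀ x ∈ L, x ≤ mx := by
    intro x hx; rcases List.mem_append.mp hx with hx | hx
    · exact hmx2 x hx
    · simp at hx; omega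
  -- A side: the sorted list
  have hperm : (PySem.List.sorted L (fun x => x) false).Perm L := PySem.List.sorted_perm L (fun x => x) false
  have hpw : (PySem.List.sorted L (fun x => x) false).Pairwise (· ≤ ·) := PySem.List.sorted_pairwise L (fun x => x)
  have hmemS : ∀ x, x ∈ PySem.List.sorted L (fun x => x) false ↔ x ∈ L := fun x => hperm.mem_iff
  -- B side: the sorted distinct list
  have hpermU : (PySem.List.sorted (PySem.Set.ofList L) (fun x => x) false).Perm (PySem.Set.ofList L) :=
    PySem.List.sorted_perm (PySem.Set.ofList L) (fun x => x) false
  have hpwU : (PySem.List.sorted (PySem.Set.ofList L) (fun x => x) false).Pairwise (· < ·) :=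
    PySem.List.sorted_ofList_pairwise_lt L
  have hmemU : ∀ x, x ∈ PySem.List.sorted (PySem.Set.ofList L) (fun x => x) false ↔ x ∈ L := by
    intro x; rw [hpermU.mem_iff]; exact PySem.Set.mem_ofList L x
  cases hs : PySem.List.sorted L (fun x => x) false with
  | nil =>
    exfalso; have := (hmemS mn).mpr hmnL1; rw [hs] at this; simp at this
  | cons a t =>
    cases hu : PySem.List.sorted (PySem.Set.ofList L) (fun x => x) false with
    | nil =>
      exfalso; have := (hmemU mn).mpr hmnL1; rw [hu] at this; simp at this
    | cons c v =>
      rw [hs] at hpw hmemS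
      rw [hu] at hpwU hmemU
      -- head of s is mn
      have ha : a = mn := by
        have h1' : a ∈ L := (hmemS a).mp List.mem_cons_self
        have h2' : ∀ y ∈ L, a ≤ y := by
          have := PySem.List.key_head_sorted_le (xs := L) (key := fun x => x) hs
          exact this
        exact le_antisymm (h2' mn hmnL1) (hmnL2 a h1')
      have hc : c = mn := by
        have h1' : c ∈ L := (hmemU c).mp List.mem_cons_self
        have h2' : ∀ y ∈ PySem.Set.ofList L, c ≤ y := by
          have := PySem.List.key_head_sorted_le (xs := PySem.Set.ofList L) (key := fun x => x) hu
          exact this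
        have h2'' : ∀ y ∈ L, c ≤ y := fun y hy => h2' y ((PySem.Set.mem_ofList L y).mpr hy)
        exact le_antisymm (h2'' mn hmnL1) (hmnL2 c h1')
      -- last of s and u is mx
      have hlastS : (a :: t).getLast (List.cons_ne_nil a t) = mx := by
        have hmem : (a :: t).getLast (List.cons_ne_nil a t) ∈ L :=
          (hmemS _).mp (List.getLast_mem _)
        have hle : mx ≤ (a :: t).getLast (List.cons_ne_nil a t) :=
          le_getLast_of_pairwise t a hpw mx ((hmemS mx).mpr hmxL1)
        exact le_antisymm (hmxL2 _ hmem) hle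
      have hlastU : (c :: v).getLast (List.cons_ne_nil c v) = mx := by
        have hmem : (c :: v).getLast (List.cons_ne_nil c v) ∈ L :=
          (hmemU _).mp (List.getLast_mem _)
        have hle : mx ≤ (c :: v).getLast (List.cons_ne_nil c v) :=
          le_getLast_of_pairwise v c (hpwU.imp le_of_lt) mx ((hmemU mx).mpr hmxL1)
        exact le_antisymm (hmxL2 _ hmem) hle
      -- length of u = card
      have hlenU : (c :: v).length = (PySem.Set.ofList L).length := by
        rw [← hu]; exact hpermU.length_eq
      have hAiff := gapA_iff t a hpw
      have hBiff := strictLen_iff v c hpwU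
      rw [hlastS] at hAiff
      rw [hlastU] at hBiff
      have hcond : (gapScanA (a :: t) = 0) ↔ (((c :: v).length : Int) = mx - c + 1) := by
        rw [hAiff, hBiff]
        constructor
        · intro hall k hk1 hk2
          exact (hmemU k).mpr ((hmemS k).mp (hall k (by omega) hk2))
        · intro hall k hk1 hk2
          exact (hmemS k).mpr ((hmemU k).mp (hall k (by omega) hk2))
      rw [hadd, ← hlenU]
      by_cases hgap : gapScanA (a :: t) = 0
      · rw [hgap]
        have hlen := hcond.mp hgap
        split
        · omega
        · rfl
      · rcases gapScanA_01 (a :: t) with h0 | h1'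
        · exact absurd h0 hgap
        · rw [h1']
          have hlen : ¬ (((c :: v).length : Int) = mx - c + 1) := fun hcc => hgap (hcond.mpr hcc)
          split
          · rfl
          · omega

theorem slotsB_eq (schedule : List (List (String × Int))) (class_id day : Int) (acc : PySem.Set Int) :
    slotsB acc schedule class_id day = (slotsA schedule class_id day).map (fun l => PySem.Set.update acc l) := by
  induction schedule generalizing acc with
  | nil => rfl
  | cons e rest ih =>
    show slotsB acc (e :: rest) class_id day = _
    unfold slotsB slotsA
    cases PySem.Dict.get? (PySem.Dict.mk e) "class_id" with
    | none => rfl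
    | some cv =>
      by_cases hcv : cv = class_id
      · simp only [hcv]
        cases PySem.Dict.get? (PySem.Dict.mk e) "day" with
        | none => rfl
        | some dv =>
          by_cases hdv : dv = day
          · simp only [hdv]
            cases PySem.Dict.get? (PySem.Dict.mk e) "time_slot" with
            | none => rfl
            | some ts =>
              simp only [ih]
              cases slotsA rest class_id day with
              | none => rfl
              | some l =>
                simp [PySem.Set.update]
          · simp [if_neg hdv, ih]
      · simp [if_neg hcv, ih]

theorem slotsA_some (schedule : List (List (String × Int))) (class_id day slot : Int)
    (hpre : Pre_check_gap_py schedule class_id day slot) : ∃ l, slotsA schedule class_id day = some l := by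
  induction schedule with
  | nil => exact ⟨[], rfl⟩
  | cons e rest ih =>
    obtain ⟨l, hl⟩ := ih (fun e' he' => hpre e' (List.mem_cons_of_mem _ he'))
    have he := hpre e List.mem_cons_self
    unfold slotsA
    cases hc : PySem.Dict.get? (PySem.Dict.mk e) "class_id" with
    | none => rw [hc] at he; simp at he
    | some cv =>
      by_cases hcv : cv = class_id
      · rw [hc, hcv] at he
        simp only [if_pos hcv]
        cases hd : PySem.Dict.get? (PySem.Dict.mk e) "day" with
        | none => rw [hd] at he; simp at he
        | some dv =>
          by_cases hdv : dv = day
          · rw [hd, hdv] at he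
            simp only [if_pos hdv]
            cases ht : PySem.Dict.get? (PySem.Dict.mk e) "time_slot" with
            | none => rw [ht] at he; simp at he
            | some ts => exact ⟨ts :: l, by rw [hl]; rfl⟩
          · simp only [if_neg hdv]; exact ⟨l, hl⟩
      · simp only [if_neg hcv]; exact ⟨l, hl⟩

theorem ports_agree (schedule : List (List (String × Int))) (class_id day slot : Int)
    (hpre : Pre_check_gap_py schedule class_id day slot) :
    check_gap_py schedule class_id day slot = check_gap_py_alt schedule class_id day slot := by
  obtain ⟨l, hA⟩ := slotsA_some schedule class_id day slot hpre
  have hB : slotsB PySem.Set.empty schedule class_id day = some (PySem.Set.ofList l) := by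
    rw [slotsB_eq, hA]
    simp [PySem.Set.update_nil_left]
  simp only [check_gap_py, check_gap_py_alt, hA, hB]
  by_cases hl : l = []
  · subst hl; simp [PySem.Set.ofList]
  · have hol : PySem.Set.ofList l ≠ [] := by
      cases l with
      | nil => exact absurd rfl hl
      | cons x xs =>
        intro hcc
        have : x ∈ PySem.Set.ofList (x :: xs) := (PySem.Set.mem_ofList _ x).mpr List.mem_cons_self
        rw [hcc] at this; simp at this
    rw [if_neg hl, if_neg hol]
    cases hmin : PySem.List.min? l (fun x => x) with
    | none => rw [PySem.List.min?_eq_none_iff] at hmin; exact absurd hmin hl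
    | some mn =>
      cases hmax : PySem.List.max? l (fun x => x) with
      | none => rw [PySem.List.max?_eq_none_iff] at hmax; exact absurd hmax hl
      | some mx =>
        have hmn1 : mn ∈ l := PySem.List.min?_mem hmin
        have hmn2 : ∀ x ∈ l, mn ≤ x := fun x hx => PySem.List.min?_id_le hmin x hx
        have hmx1 : mx ∈ l := PySem.List.max?_mem hmax
        have hmx2 : ∀ x ∈ l, x ≤ mx := fun x hx => PySem.List.max?_isMax hmax x hx
        have hminU : PySem.List.min? (PySem.Set.ofList l) (fun x => x) = some mn :=
          min?_id_eq _ _ ((PySem.Set.mem_ofList _ _).mpr hmn1)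
            (fun x hx => hmn2 x ((PySem.Set.mem_ofList _ _).mp hx))
        have hmaxU : PySem.List.max? (PySem.Set.ofList l) (fun x => x) = some mx :=
          max?_id_eq _ _ ((PySem.Set.mem_ofList _ _).mpr hmx1)
            (fun x hx => hmx2 x ((PySem.Set.mem_ofList _ _).mp hx))
        rw [hminU, hmaxU]
        dsimp only
        by_cases hrange : slot < mn ∨ slot > mx
        · simp only [if_pos hrange]
        · rw [if_neg hrange, if_neg hrange]
          push Not at hrange
          exact core l mn mx slot hmn1 hmn2 hmx1 hmx2 hrange.1 hrange.2

-- ===== VERDICT (by name: the statement is the Claim_ definition above) =====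
theorem check_gap_py_spec : Claim_equal_check_gap_py := by
  intro schedule class_id day slot _hdom hpre
  unfold Spec_check_gap_py
  exact ports_agree schedule class_id day slot hpre
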